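-- pv_equiv track=rewrite | github.com/grasshopperTrainer/coding_practice | programmers/가사 검색.py | solution
-- ===== SOURCE A (Python) =====
-- def solution(words, queries):
--     WILDCARD, END = '?', '_end'
--
--     pref_dic, suff_dic = {}, {}
--     for word in words:
--         L = len(word)
--         pref_root, suff_root = pref_dic.setdefault(L, {}), suff_dic.setdefault(L, {})
--         for i in range(len(word)):
--             pref_root = pref_root.setdefault(word[i], [0, {}])
--             pref_root[0] += 1
--             pref_root = pref_root[1]
--             suff_root = suff_root.setdefault(word[-(i + 1)], [0, {}])
--             suff_root[0] += 1
--             suff_root = suff_root[1]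
--         pref_root[END] = END
--         suff_root[END] = END
--
--     answer = []
--     for q in queries:
--         L = len(q)
--         if q[0] == WILDCARD:
--             dic = suff_dic
--             q = q[::-1]
--         else:
--             dic = pref_dic
--
--         if L not in dic:
--             answer.append(0)
--             continue
--         dic = dic[L]
--         for c in q:
--             if c == WILDCARD:
--                 counter = 0
--                 for count, _ in dic.values():
--                     counter += count
--                 answer.append(counter)
--                 break
--             else:
--                 if c not in dic:
--                     answer.append(0)
--                     break
--                 else:
--                     dic = dic[c][1]
--
--     return answer
-- ===== SOURCE B (Python) =====
-- def solution(words, queries):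
--     by_len = {}
--     for w in words:
--         by_len.setdefault(len(w), []).append(w)
--     answer = []
--     for q in queries:
--         group = by_len.get(len(q), [])
--         if not group:
--             answer.append(0)
--             continue
--         if q.startswith('?'):
--             pattern = q[::-1]
--             group = [w[::-1] for w in group]
--         else:
--             pattern = q
--         stem = ''
--         for ch in pattern:
--             if ch == '?':
--                 answer.append(sum(1 for w in group if w.startswith(stem)))
--                 break
--             stem += ch
--             if not any(w.startswith(stem) for w in group):
--                 answer.append(0)
--                 break
--     return answer
-- ===== Notes on version B (the rewrite author's own statement) =====
-- stated objective: simpler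
-- what changed: B drops A's two count-carrying tries: it groups the words once by length in a plain dict, and answers each query by scanning the pattern over that length group directly — at a wildcard it counts the group's words that start with the stem read so far, at a dead end it records 0. Pre_ excludes inputs whose queries list contains the empty string, on which A raises IndexError at q[0].
import Mathlib
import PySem

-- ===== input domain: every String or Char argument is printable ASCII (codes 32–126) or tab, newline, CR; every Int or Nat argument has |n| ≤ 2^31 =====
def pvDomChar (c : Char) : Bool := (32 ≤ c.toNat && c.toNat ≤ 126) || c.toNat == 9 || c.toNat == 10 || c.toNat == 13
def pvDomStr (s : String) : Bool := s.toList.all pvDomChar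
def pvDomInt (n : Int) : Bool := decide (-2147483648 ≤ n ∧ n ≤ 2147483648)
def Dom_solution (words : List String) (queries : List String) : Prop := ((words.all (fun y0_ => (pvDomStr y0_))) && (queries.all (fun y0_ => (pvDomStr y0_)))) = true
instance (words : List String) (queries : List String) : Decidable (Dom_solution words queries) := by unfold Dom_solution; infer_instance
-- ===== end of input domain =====

-- B replaces A's pair of count-carrying tries by one dict of length groups and a direct
-- per-query scan over the group: simpler (no trie construction).

-- ===== PORT A =====
-- A's trie node: dict from chars to [count, child-dict] plus an optional '_end' marker.
-- (mutual pair instead of a nested inductive; the '_end' key is the Bool flag — it is a 4-char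
-- string key, never equal to a query char and never unpacked, so a flag is exact.)
mutual
inductive PTrie where
  | mk : PChildren → Bool → PTrie
inductive PChildren where
  | nil : PChildren
  | cons : Char → Int → PTrie → PChildren → PChildren
end

def emptyT : PTrie := .mk .nil false

-- dict lookup by char key, in insertion order
def findC : PChildren → Char → Option (Int × PTrie)
  | .nil, _ => none
  | .cons c' n t tl, c => if c' = c then some (n, t) else findC tl c

-- A's inner loop over one word: setdefault(c, [0, {}]), count += 1, descend; '_end' at the leaf.
-- (setdefault appends a fresh key at the end of the dict, hence at the end of the child list.)
mutual
def insertW : PTrie → List Char → PTrie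
  | .mk ch _, [] => .mk ch true
  | .mk ch e, c :: rest => .mk (bump ch c rest) e
  termination_by t w => (w.length, sizeOf t)
def bump : PChildren → Char → List Char → PChildren
  | .nil, c, rest => .cons c 1 (insertW emptyT rest) .nil
  | .cons c' n t tl, c, rest =>
      if c' = c then .cons c' (n + 1) (insertW t rest) tl
      else .cons c' n t (bump tl c rest)
  termination_by ch _ rest => (rest.length + 1, sizeOf ch)
end

-- 'for count, _ in dic.values(): counter += count' (values in insertion order)
def sumC : PChildren → Int
  | .nil => 0
  | .cons _ n _ tl => n + sumC tl

-- A's query loop over the (possibly reversed) query characters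
def walkA : PTrie → List Char → Option Int
  | _, [] => none                            -- loop ends without a break: nothing appended
  | .mk ch _, c :: rest =>
      if c = '?' then some (sumC ch)
      else match findC ch c with
        | none => some 0
        | some (_, t) => walkA t rest

-- one iteration of A's word loop: Python walks both tries in a single index loop over the word
-- (word[i] / word[-(i+1)]), incrementing each node count in place; the net effect on the two
-- dict-of-tries is one insertion of the word / the reversed word under the length key.
def buildStep (st : PySem.Dict Int PTrie × PySem.Dict Int PTrie) (word : String) :
    PySem.Dict Int PTrie × PySem.Dict Int PTrie :=
  let L : Int := PySem.Str.len word
  let wl := word.toList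
  (PySem.Dict.insert st.1 L (insertW (PySem.Dict.getD st.1 L emptyT) wl),
   PySem.Dict.insert st.2 L (insertW (PySem.Dict.getD st.2 L emptyT) wl.reverse))

def solution (words : List String) (queries : List String) : List Int :=
  let dics := words.foldl buildStep (PySem.Dict.empty, PySem.Dict.empty)
  queries.foldl (fun answer q =>
    let L : Int := PySem.Str.len q
    match PySem.Str.pyGet? q 0 with      -- q[0]; none = IndexError, excluded by Pre_
    | none => answer
    | some c0 =>
      let p := if c0 = '?' then (dics.2, q.toList.reverse) else (dics.1, q.toList)
      match PySem.Dict.get? p.1 L with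
      | none => answer ++ [0]            -- 'if L not in dic: append(0); continue'
      | some t => answer ++ (walkA t p.2).toList) []

-- ===== PORT B =====
-- Source B's inner pattern loop: grow the stem; at '?' count the words starting with it,
-- at a dead end record 0, on normal exit record nothing
def walkB (group : List (List Char)) (stem : List Char) : List Char → Option Int
  | [] => none
  | c :: rest =>
      if c = '?' then
        some ((group.countP (fun w => PySem.Chars.startswith w stem) : Int))
      else if (group.any (fun w => PySem.Chars.startswith w (stem ++ [c]))) = false then
        some 0
      else walkB group (stem ++ [c]) rest

def solution_alt (words : List String) (queries : List String) : List Int :=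
  let byLen := words.foldl (fun d w =>
    PySem.Dict.insert d (PySem.Str.len w) (PySem.Dict.getD d (PySem.Str.len w) [] ++ [w]))
    (PySem.Dict.empty : PySem.Dict Int (List String))
  queries.foldl (fun answer q =>
    let group := PySem.Dict.getD byLen (PySem.Str.len q) []
    if group.isEmpty then answer ++ [0]
    else
      let p := if PySem.Str.startswith q "?" then
          (q.toList.reverse, group.map (fun w => w.toList.reverse))   -- q[::-1], [w[::-1] …]
        else (q.toList, group.map (fun w => w.toList))
      answer ++ (walkB p.2 [] p.1).toList) []

-- ===== PRECONDITION & SPEC =====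
-- Pre_ excludes inputs containing an empty query: A evaluates q[0] there and raises IndexError.
def Pre_solution (words : List String) (queries : List String) : Prop := "" ∉ queries
instance (words : List String) (queries : List String) : Decidable (Pre_solution words queries) := by unfold Pre_solution; infer_instance

def pvWitness_solution : List String × List String := (["abc", "abd", "zzz"], ["ab?", "?bc", "abc", "zz", "???"])

def Spec_solution (words : List String) (queries : List String) (out : List Int) : Prop := out = solution_alt words queries
instance (words : List String) (queries : List String) (out : List Int) : Decidable (Spec_solution words queries out) := by unfold Spec_solution; infer_instance

-- ===== CLAIM (what is proved, stated in full; the proof is below) =====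
def Claim_equal_solution : Prop := ∀ (words : List String) (queries : List String), Dom_solution words queries → Pre_solution words queries → Spec_solution words queries (solution words queries)

-- ===== LEMMAS AND PROOFS =====

-- proof-only views of a trie node
def childD (t : PTrie) (c : Char) : PTrie :=
  match t with
  | .mk ch _ => match findC ch c with | none => emptyT | some (_, t') => t'

def hasC (t : PTrie) (c : Char) : Bool :=
  match t with | .mk ch _ => (findC ch c).isSome

def sumT (t : PTrie) : Int :=
  match t with | .mk ch _ => sumC ch

def tails (c : Char) (ws : List (List Char)) : List (List Char) :=
  ws.filterMap (fun w => match w with | [] => none | c' :: wr => if c' = c then some wr else none)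

theorem findC_bump (ch : PChildren) (c : Char) (rest : List Char) (c' : Char) :
    findC (bump ch c rest) c' =
      if c' = c then
        (match findC ch c with
         | none => some (1, insertW emptyT rest)
         | some (n, t) => some (n + 1, insertW t rest))
      else findC ch c' := by
  cases ch with
  | nil =>
      by_cases h : c' = c
      · simp [bump, findC, h]
      · simp only [bump, findC, if_neg h, if_neg (fun hh : c = c' => h hh.symm)]
  | cons k n t tl =>
      by_cases hk : k = c
      · subst hk
        by_cases h : c' = k <;> simp [bump, findC, h, eq_comm]
      · have ih := findC_bump tl c rest c'
        by_cases h : c' = c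
        · subst h
          simp only [bump, if_neg hk, findC, ih]
        · simp only [bump, if_neg hk, findC, ih, if_neg h]

theorem sumC_bump (ch : PChildren) (c : Char) (rest : List Char) :
    sumC (bump ch c rest) = sumC ch + 1 := by
  cases ch with
  | nil => simp [bump, sumC]
  | cons k n t tl =>
      have ih := sumC_bump tl c rest
      by_cases h : k = c <;> simp [bump, sumC, h, ih] <;> ring

theorem childD_insertW (t : PTrie) (w : List Char) (c : Char) :
    childD (insertW t w) c =
      match w with
      | [] => childD t c
      | c' :: wr => if c' = c then insertW (childD t c) wr else childD t c := by
  obtain ⟨ch, e⟩ := t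
  cases w with
  | nil => simp [insertW, childD]
  | cons c' wr =>
      simp only [insertW, childD]
      rw [findC_bump]
      by_cases h : c = c'
      · subst h
        cases hf : findC ch c <;> simp
      · rw [if_neg h, if_neg (fun hh : c' = c => h hh.symm)]

theorem hasC_insertW (t : PTrie) (w : List Char) (c : Char) :
    hasC (insertW t w) c = (hasC t c || match w with | [] => false | c' :: _ => c' = c) := by
  obtain ⟨ch, e⟩ := t
  cases w with
  | nil => simp [insertW, hasC]
  | cons c' wr =>
      simp only [insertW, hasC]
      rw [findC_bump]
      by_cases h : c = c'
      · subst h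
        cases hf : findC ch c <;> simp
      · rw [if_neg h]
        simp only [show (c' = c) = False from eq_false (fun hh => h hh.symm)]
        simp

theorem sumT_insertW (t : PTrie) (w : List Char) :
    sumT (insertW t w) = sumT t + (if w = [] then 0 else 1) := by
  obtain ⟨ch, e⟩ := t
  cases w with
  | nil => simp [insertW, sumT]
  | cons c' wr => simp [insertW, sumT, sumC_bump]

theorem tails_cons (c : Char) (w : List Char) (ws : List (List Char)) :
    tails c (w :: ws) =
      (match w with
       | [] => tails c ws
       | c' :: wr => if c' = c then wr :: tails c ws else tails c ws) := by
  cases w with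
  | nil => simp [tails]
  | cons c' wr => by_cases h : c' = c <;> simp [tails, h]

theorem childD_fold (ws : List (List Char)) (t : PTrie) (c : Char) :
    childD (ws.foldl insertW t) c = (tails c ws).foldl insertW (childD t c) := by
  induction ws generalizing t with
  | nil => rfl
  | cons w ws ih =>
      rw [List.foldl_cons, ih, childD_insertW, tails_cons]
      cases w with
      | nil => rfl
      | cons c' wr => by_cases h : c' = c <;> simp [h]

theorem hasC_fold (ws : List (List Char)) (t : PTrie) (c : Char) :
    hasC (ws.foldl insertW t) c =
      (hasC t c || ws.any (fun w => match w with | [] => false | c' :: _ => c' = c)) := by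
  induction ws generalizing t with
  | nil => simp
  | cons w ws ih =>
      rw [List.foldl_cons, ih, hasC_insertW]
      cases w <;> simp [Bool.or_assoc]

theorem sumT_fold (ws : List (List Char)) (t : PTrie) :
    sumT (ws.foldl insertW t) = sumT t + (ws.countP (fun w => !w.isEmpty) : Int) := by
  induction ws generalizing t with
  | nil => simp
  | cons w ws ih =>
      rw [List.foldl_cons, ih, sumT_insertW, List.countP_cons]
      cases w <;> simp [Int.add_comm, Int.add_assoc]

theorem walkA_cons (t : PTrie) (c : Char) (rest : List Char) :
    walkA t (c :: rest) =
      if c = '?' then some (sumT t)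
      else if hasC t c then walkA (childD t c) rest else some 0 := by
  obtain ⟨ch, e⟩ := t
  by_cases h : c = '?'
  · simp [walkA, sumT, h]
  · simp only [walkA, hasC, childD, if_neg h]
    cases hf : findC ch c <;> simp [hf]

theorem countP_tails (c : Char) (ws : List (List Char)) (p : List Char → Bool) :
    (tails c ws).countP p =
      ws.countP (fun w => match w with | [] => false | c' :: wr => c' = c && p wr) := by
  induction ws with
  | nil => rfl
  | cons w ws ih =>
      rw [tails_cons]
      cases w with
      | nil => simp [List.countP_cons, ih]
      | cons c' wr => by_cases h : c' = c <;> simp [List.countP_cons, h, ih]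

theorem any_tails (c : Char) (ws : List (List Char)) (p : List Char → Bool) :
    (tails c ws).any p =
      ws.any (fun w => match w with | [] => false | c' :: wr => c' = c && p wr) := by
  induction ws with
  | nil => rfl
  | cons w ws ih =>
      rw [tails_cons]
      cases w with
      | nil => simp [ih]
      | cons c' wr => by_cases h : c' = c <;> simp [h, ih]

theorem any_head_prefix (c : Char) (l : List Char) (ws : List (List Char)) :
    (ws.any (fun w => match w with
      | [] => false
      | c' :: wr => decide (c' = c) && l.isPrefixOf wr)) =
    ws.any (fun w => (c :: l).isPrefixOf w) := by
  induction ws with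
  | nil => rfl
  | cons w ws ihw =>
      rw [List.any_cons, List.any_cons, ihw]
      congr 1
      cases w with
      | nil => simp [List.isPrefixOf]
      | cons c' wr =>
          by_cases h' : c' = c
          · subst h'
            simp [List.isPrefixOf]
          · simp [List.isPrefixOf, h', eq_false (fun hh2 : c = c' => h' hh2.symm)]

-- the main characterisation of A's walk over a trie built from a list of words
theorem walk_main (q : List Char) (ws : List (List Char)) :
    walkA (ws.foldl insertW emptyT) q =
      (if q = [] then none
       else if (q.takeWhile (· ≠ '?')).length < q.length then
         some ((ws.countP (fun w =>
           (q.takeWhile (· ≠ '?')).isPrefixOf w &&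
           decide ((q.takeWhile (· ≠ '?')).length < w.length)) : Int))
       else if ws.any (fun w => q.isPrefixOf w) then none else some 0) := by
  induction q generalizing ws with
  | nil => simp [walkA]
  | cons c rest ih =>
      rw [walkA_cons, if_neg (show ¬(c :: rest = []) from by simp)]
      by_cases hc : c = '?'
      · subst hc
        rw [if_pos rfl, sumT_fold, show sumT emptyT = 0 from rfl, zero_add,
          show ('?' :: rest).takeWhile (· ≠ '?') = [] from by simp,
          if_pos (by simp : ([] : List Char).length < ('?' :: rest).length)]
        simp only [Option.some.injEq, Nat.cast_inj]
        apply List.countP_congr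
        intro w _
        cases w <;> simp
      · rw [if_neg hc,
          show (c :: rest).takeWhile (· ≠ '?') = c :: rest.takeWhile (· ≠ '?') from by
            simp [hc]]
        by_cases hh : hasC (ws.foldl insertW emptyT) c = true
        · -- the child for c exists
          have hex : ws.any (fun w => match w with
              | [] => false
              | c' :: _ => decide (c' = c)) = true := by
            have h1 := hasC_fold ws emptyT c
            rw [hh, show hasC emptyT c = false from rfl, Bool.false_or] at h1
            exact h1.symm
          rw [if_pos hh, childD_fold, show childD emptyT c = emptyT from rfl,
            ih (tails c ws)]
          by_cases hre : rest = []
          · subst hre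
            rw [if_pos rfl,
              if_neg (by simp : ¬(c :: ([] : List Char).takeWhile (· ≠ '?')).length < [c].length)]
            have hany : ws.any (fun w => [c].isPrefixOf w) = true := by
              rw [List.any_eq_true] at hex ⊢
              obtain ⟨w, hw, hp⟩ := hex
              refine ⟨w, hw, ?_⟩
              cases w with
              | nil => simp at hp
              | cons c' wr =>
                  simp only [decide_eq_true_eq] at hp
                  simp [List.isPrefixOf, hp]
            rw [if_pos hany]
          · rw [if_neg hre]
            by_cases hlt : (rest.takeWhile (· ≠ '?')).length < rest.length
            · rw [if_pos hlt, countP_tails,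
                if_pos (show ((c :: rest.takeWhile (· ≠ '?')).length < (c :: rest).length) from by
                  simp only [List.length_cons, Nat.add_lt_add_iff_right]; exact hlt)]
              simp only [Option.some.injEq, Nat.cast_inj]
              apply List.countP_congr
              intro w _
              cases w with
              | nil => simp [List.isPrefixOf]
              | cons c' wr =>
                  by_cases h' : c' = c
                  · subst h'
                    simp [List.isPrefixOf]
                  · simp [List.isPrefixOf, h', eq_false (fun hh2 : c = c' => h' hh2.symm)]
            · rw [if_neg hlt, any_tails, any_head_prefix,
                if_neg (show ¬((c :: rest.takeWhile (· ≠ '?')).length < (c :: rest).length) from by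
                  simp only [List.length_cons, Nat.add_lt_add_iff_right]; exact hlt)]
        · rw [if_neg hh]
          have hf : hasC (ws.foldl insertW emptyT) c = false := Bool.eq_false_iff.mpr hh
          rw [hasC_fold, show hasC emptyT c = false from rfl, Bool.false_or] at hf
          rw [List.any_eq_false] at hf
          by_cases hlt : (c :: rest.takeWhile (· ≠ '?')).length < (c :: rest).length
          · rw [if_pos hlt]
            have hz : ws.countP (fun w => (c :: rest.takeWhile (· ≠ '?')).isPrefixOf w &&
                decide ((c :: rest.takeWhile (· ≠ '?')).length < w.length)) = 0 := by
              rw [List.countP_eq_zero]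
              intro w hw
              cases w with
              | nil => simp [List.isPrefixOf]
              | cons c' wr =>
                  have h' : ¬(c' = c) := fun hcc => by
                    exact absurd (hf _ hw) (by simp [hcc])
                  simp [List.isPrefixOf, eq_false (fun hh2 : c = c' => h' hh2.symm)]
            rw [hz]
            simp
          · rw [if_neg hlt]
            have hz : ws.any (fun w => (c :: rest).isPrefixOf w) = false := by
              rw [List.any_eq_false]
              intro w hw
              cases w with
              | nil => simp [List.isPrefixOf]
              | cons c' wr =>
                  have h' : ¬(c' = c) := fun hcc => by
                    exact absurd (hf _ hw) (by simp [hcc])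
                  simp [List.isPrefixOf, eq_false (fun hh2 : c = c' => h' hh2.symm)]
            rw [hz]
            simp

-- the matching characterisation of B's pattern scan
theorem walkB_main (gl : List (List Char)) (pat stem : List Char) :
    walkB gl stem pat =
      (if pat = [] then none
       else if (pat.takeWhile (· ≠ '?')).length < pat.length then
         some ((gl.countP (fun w =>
           PySem.Chars.startswith w (stem ++ pat.takeWhile (· ≠ '?'))) : Int))
       else if gl.any (fun w => PySem.Chars.startswith w (stem ++ pat)) then none
       else some 0) := by
  induction pat generalizing stem with
  | nil => simp [walkB]
  | cons c rest ih =>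
      simp only [walkB]
      rw [if_neg (show ¬(c :: rest = []) from by simp)]
      by_cases hc : c = '?'
      · subst hc
        rw [if_pos rfl,
          show ('?' :: rest).takeWhile (· ≠ '?') = [] from by simp,
          if_pos (by simp : ([] : List Char).length < ('?' :: rest).length)]
        simp
      · rw [if_neg hc,
          show (c :: rest).takeWhile (· ≠ '?') = c :: rest.takeWhile (· ≠ '?') from by
            simp [hc]]
        by_cases hdead : (gl.any (fun w => PySem.Chars.startswith w (stem ++ [c]))) = false
        · -- no word continues with the stem: both the count and the 'any' collapse
          rw [if_pos hdead]
          have hmono : ∀ (ext : List Char) (w : List Char), w ∈ gl →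
              ¬ PySem.Chars.startswith w (stem ++ [c] ++ ext) = true := by
            intro ext w hw h2
            have h3 : PySem.Chars.startswith w (stem ++ [c]) = true := by
              rw [PySem.Chars.startswith_iff] at h2 ⊢
              exact (List.prefix_append (stem ++ [c]) ext).trans h2
            exact (List.any_eq_false.mp hdead w hw) h3
          by_cases hlt : (c :: rest.takeWhile (· ≠ '?')).length < (c :: rest).length
          · rw [if_pos hlt]
            have hz : gl.countP (fun w =>
                PySem.Chars.startswith w (stem ++ c :: rest.takeWhile (· ≠ '?'))) = 0 := by
              rw [List.countP_eq_zero]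
              intro w hw
              have := hmono (rest.takeWhile (· ≠ '?')) w hw
              simpa [List.append_assoc] using this
            rw [hz]
            simp
          · rw [if_neg hlt]
            have hz : gl.any (fun w => PySem.Chars.startswith w (stem ++ c :: rest)) = false := by
              rw [List.any_eq_false]
              intro w hw
              have := hmono rest w hw
              simpa [List.append_assoc] using this
            rw [hz]
            simp
        · rw [if_neg hdead, ih (stem ++ [c])]
          by_cases hre : rest = []
          · subst hre
            rw [if_pos rfl,
              if_neg (by simp : ¬(c :: ([] : List Char).takeWhile (· ≠ '?')).length < [c].length)]
            have htrue : gl.any (fun w => PySem.Chars.startswith w (stem ++ [c])) = true := by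
              revert hdead
              cases gl.any (fun w => PySem.Chars.startswith w (stem ++ [c])) <;> simp
            rw [show stem ++ [c] = stem ++ c :: ([] : List Char) from by simp] at htrue
            rw [htrue]
            simp
          · rw [if_neg hre]
            by_cases hlt : (rest.takeWhile (· ≠ '?')).length < rest.length
            · rw [if_pos hlt,
                if_pos (show ((c :: rest.takeWhile (· ≠ '?')).length < (c :: rest).length) from by
                  simp only [List.length_cons, Nat.add_lt_add_iff_right]; exact hlt)]
              simp
            · rw [if_neg hlt,
                if_neg (show ¬((c :: rest.takeWhile (· ≠ '?')).length < (c :: rest).length) from by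
                  simp only [List.length_cons, Nat.add_lt_add_iff_right]; exact hlt)]
              simp

-- ===== assembly: both dicts, per query =====

-- group of words of length L, viewed through f (identity or reversal)
def grpOf (f : String → List Char) (L : Int) (ws : List String) : List (List Char) :=
  ws.filterMap (fun w => if PySem.Str.len w = L then some (f w) else none)

-- the length group as B builds it (strings, in order)
def grpS (L : Int) (ws : List String) : List String :=
  ws.filter (fun w => decide (PySem.Str.len w = L))

def stepA (dics : PySem.Dict Int PTrie × PySem.Dict Int PTrie)
    (answer : List Int) (q : String) : List Int :=
  let L : Int := PySem.Str.len q
  match PySem.Str.pyGet? q 0 with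
  | none => answer
  | some c0 =>
    let p := if c0 = '?' then (dics.2, q.toList.reverse) else (dics.1, q.toList)
    match PySem.Dict.get? p.1 L with
    | none => answer ++ [0]
    | some t => answer ++ (walkA t p.2).toList

def stepB (byLen : PySem.Dict Int (List String)) (answer : List Int) (q : String) : List Int :=
  let group := PySem.Dict.getD byLen (PySem.Str.len q) []
  if group.isEmpty then answer ++ [0]
  else
    let p := if PySem.Str.startswith q "?" then
        (q.toList.reverse, group.map (fun w => w.toList.reverse))
      else (q.toList, group.map (fun w => w.toList))
    answer ++ (walkB p.2 [] p.1).toList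

def bStep (d : PySem.Dict Int (List String)) (w : String) : PySem.Dict Int (List String) :=
  PySem.Dict.insert d (PySem.Str.len w) (PySem.Dict.getD d (PySem.Str.len w) [] ++ [w])

theorem solution_eq (words queries : List String) :
    solution words queries =
      queries.foldl (stepA (words.foldl buildStep (PySem.Dict.empty, PySem.Dict.empty))) [] := rfl

theorem solution_alt_eq (words queries : List String) :
    solution_alt words queries =
      queries.foldl (stepB (words.foldl bStep PySem.Dict.empty)) [] := rfl

theorem startswith_eq_isPrefixOf (l p : List Char) :
    PySem.Chars.startswith l p = p.isPrefixOf l := by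
  rw [Bool.eq_iff_iff, PySem.Chars.startswith_iff, List.isPrefixOf_iff_prefix]

theorem str_len_eq (s : String) : PySem.Str.len s = (s.toList.length : Int) := by simp

theorem grpOf_cons (f : String → List Char) (L : Int) (w : String) (ws : List String) :
    grpOf f L (w :: ws) =
      if PySem.Str.len w = L then f w :: grpOf f L ws else grpOf f L ws := by
  unfold grpOf
  rw [List.filterMap_cons]
  by_cases h : PySem.Str.len w = L
  · rw [if_pos h, if_pos h]
  · rw [if_neg h, if_neg h]

theorem grpS_cons (L : Int) (w : String) (ws : List String) :
    grpS L (w :: ws) = if PySem.Str.len w = L then w :: grpS L ws else grpS L ws := by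
  unfold grpS
  rw [List.filter_cons]
  by_cases h : PySem.Str.len w = L <;> simp [h]

theorem grpOf_eq_map_grpS (f : String → List Char) (L : Int) (ws : List String) :
    grpOf f L ws = (grpS L ws).map f := by
  induction ws with
  | nil => rfl
  | cons w ws ih =>
      rw [grpOf_cons, grpS_cons]
      by_cases h : PySem.Str.len w = L
      · rw [if_pos h, if_pos h, ih, List.map_cons]
      · rw [if_neg h, if_neg h, ih]

theorem dict_fold1 (ws : List String) (pd sd : PySem.Dict Int PTrie) (L : Int) :
    ((ws.foldl buildStep (pd, sd)).1).get? L =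
      (if grpOf (fun w => w.toList) L ws = [] then pd.get? L
       else some ((grpOf (fun w => w.toList) L ws).foldl insertW (pd.getD L emptyT))) := by
  induction ws generalizing pd sd with
  | nil => simp [grpOf]
  | cons w ws ih =>
      rw [List.foldl_cons, grpOf_cons, ih]
      by_cases h : PySem.Str.len w = L
      · simp only [buildStep, h, reduceIte]
        rw [PySem.Dict.get?_insert_self, PySem.Dict.getD_insert_self]
        by_cases hg : grpOf (fun w => w.toList) L ws = [] <;>
          simp [hg, List.foldl_cons]
      · simp only [buildStep, if_neg h]
        rw [PySem.Dict.get?_insert_of_ne _ _ (fun hh => h hh.symm),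
          PySem.Dict.getD_insert_of_ne _ _ _ (fun hh => h hh.symm)]

theorem dict_fold2 (ws : List String) (pd sd : PySem.Dict Int PTrie) (L : Int) :
    ((ws.foldl buildStep (pd, sd)).2).get? L =
      (if grpOf (fun w => w.toList.reverse) L ws = [] then sd.get? L
       else some ((grpOf (fun w => w.toList.reverse) L ws).foldl insertW (sd.getD L emptyT))) := by
  induction ws generalizing pd sd with
  | nil => simp [grpOf]
  | cons w ws ih =>
      rw [List.foldl_cons, grpOf_cons, ih]
      by_cases h : PySem.Str.len w = L
      · simp only [buildStep, h, reduceIte]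
        rw [PySem.Dict.get?_insert_self, PySem.Dict.getD_insert_self]
        by_cases hg : grpOf (fun w => w.toList.reverse) L ws = [] <;>
          simp [hg, List.foldl_cons]
      · simp only [buildStep, if_neg h]
        rw [PySem.Dict.get?_insert_of_ne _ _ (fun hh => h hh.symm),
          PySem.Dict.getD_insert_of_ne _ _ _ (fun hh => h hh.symm)]

theorem byLen_fold (ws : List String) (d : PySem.Dict Int (List String)) (L : Int) :
    PySem.Dict.getD (ws.foldl bStep d) L [] = PySem.Dict.getD d L [] ++ grpS L ws := by
  induction ws generalizing d with
  | nil => simp [grpS]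
  | cons w ws ih =>
      rw [List.foldl_cons, ih]
      unfold bStep
      by_cases h : PySem.Str.len w = L
      · rw [h, PySem.Dict.getD_insert_self, grpS_cons, if_pos h]
        simp
      · rw [PySem.Dict.getD_insert_of_ne _ _ _ (fun hh => h hh.symm), grpS_cons, if_neg h]

theorem grpS_len (L : Int) (ws : List String) :
    ∀ w ∈ grpS L ws, PySem.Str.len w = L := by
  intro w hw
  have := List.mem_filter.mp hw
  exact of_decide_eq_true this.2

-- B's branch test: q.startswith('?') reads the first character
theorem startswith_q_head (q : String) (c0 : Char) (qt : List Char) (hc0 : q.toList = c0 :: qt) :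
    PySem.Str.startswith q "?" = decide (c0 = '?') := by
  have : PySem.Str.startswith q "?" = PySem.Chars.startswith q.toList ['?'] := by
    simp [PySem.Str.startswith]
  rw [this, hc0, startswith_eq_isPrefixOf]
  by_cases h : c0 = '?'
  · simp [List.isPrefixOf, h]
  · simp [List.isPrefixOf, h, eq_false (fun hh : '?' = c0 => h hh.symm)]

-- both closed forms coincide on a length group
theorem event_eq (gS : List String) (f : String → List Char)
    (hlen : ∀ w : String, (f w).length = w.toList.length)
    (L : Nat) (hL : ∀ w ∈ gS, w.toList.length = L)
    (pat : List Char) (hpat : pat.length = L) :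
    (if pat = [] then (none : Option Int)
     else if (pat.takeWhile (· ≠ '?')).length < pat.length then
       some (((gS.map f).countP (fun w =>
         (pat.takeWhile (· ≠ '?')).isPrefixOf w &&
         decide ((pat.takeWhile (· ≠ '?')).length < w.length)) : Int))
     else if (gS.map f).any (fun w => pat.isPrefixOf w) then none else some 0)
    =
    (if pat = [] then none
     else if (pat.takeWhile (· ≠ '?')).length < pat.length then
       some (((gS.map f).countP (fun w =>
         PySem.Chars.startswith w ([] ++ pat.takeWhile (· ≠ '?'))) : Int))
     else if (gS.map f).any (fun w => PySem.Chars.startswith w ([] ++ pat)) then none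
     else some 0) := by
  by_cases hnil : pat = []
  · simp [hnil]
  · rw [if_neg hnil, if_neg hnil]
    by_cases hlt : (pat.takeWhile (· ≠ '?')).length < pat.length
    · rw [if_pos hlt, if_pos hlt]
      simp only [Option.some.injEq, Nat.cast_inj]
      apply List.countP_congr
      intro w' hw'
      obtain ⟨w, hw, rfl⟩ := List.mem_map.mp hw'
      have hwl : (f w).length = L := by rw [hlen, hL w hw]
      have hlt' : (pat.takeWhile (· ≠ '?')).length < (f w).length := by
        rw [hwl, ← hpat]; exact hlt
      simp [startswith_eq_isPrefixOf]
      intro _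
      simpa using hlt'
    · rw [if_neg hlt, if_neg hlt]
      have hpred : (fun (w : List Char) => PySem.Chars.startswith w ([] ++ pat))
          = (fun w => pat.isPrefixOf w) := by
        funext w
        simp [startswith_eq_isPrefixOf]
      rw [hpred]

-- the per-query equality: for a nonempty query both steps append the same suffix
theorem step_eq (words : List String) (q : String) (hq : q ≠ "") (ans : List Int) :
    stepA (words.foldl buildStep (PySem.Dict.empty, PySem.Dict.empty)) ans q
      = stepB (words.foldl bStep PySem.Dict.empty) ans q := by
  obtain ⟨c0, qt, hc0⟩ : ∃ c0 qt, q.toList = c0 :: qt := by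
    cases hql : q.toList with
    | nil => exact absurd (String.toList_eq_nil_iff.mp hql) hq
    | cons a l => exact ⟨a, l, rfl⟩
  have hget : PySem.Str.pyGet? q 0 = some c0 := by
    have h1 := PySem.Str.pyGet?_natCast q (0 : Nat)
    simp only [Nat.cast_zero] at h1
    rw [h1, hc0]
    rfl
  have hsw := startswith_q_head q c0 qt hc0
  have hgroup := byLen_fold words PySem.Dict.empty (PySem.Str.len q)
  rw [PySem.Dict.getD_empty] at hgroup
  simp only [List.nil_append] at hgroup
  have hLg : ∀ w ∈ grpS (PySem.Str.len q) words, w.toList.length = q.toList.length := by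
    intro w hw
    have h1 := grpS_len _ _ w hw
    rw [str_len_eq, str_len_eq] at h1
    exact_mod_cast h1
  by_cases hg : grpS (PySem.Str.len q) words = []
  · -- no word of this length: A misses the dict key, B sees the empty group
    have hg1 : grpOf (fun w => w.toList) (PySem.Str.len q) words = [] := by
      rw [grpOf_eq_map_grpS, hg]; rfl
    have hg2 : grpOf (fun w => w.toList.reverse) (PySem.Str.len q) words = [] := by
      rw [grpOf_eq_map_grpS, hg]; rfl
    have hg1c : grpOf (fun w => w.toList) ((q.length : Int)) words = [] := by
      simpa using hg1
    have hg2c : grpOf (fun w => w.toList.reverse) ((q.length : Int)) words = [] := by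
      simpa using hg2
    simp only [stepA, stepB, hget, hgroup, hg, List.isEmpty_nil, if_true]
    by_cases hc : c0 = '?' <;>
      simp [hc, dict_fold1, dict_fold2, hg1, hg2, hg1c, hg2c, PySem.Dict.get?_empty]
  · simp only [stepA, stepB, hget, hgroup,
      show (grpS (PySem.Str.len q) words).isEmpty = false from by
        cases hgs : grpS (PySem.Str.len q) words with
        | nil => exact absurd hgs hg
        | cons a l => rfl,
      Bool.false_eq_true, if_false]
    by_cases hc : c0 = '?'
    · -- suffix pattern
      simp only [hc, hsw, decide_true, if_true, reduceIte, dict_fold2,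
        grpOf_eq_map_grpS, show ((grpS (PySem.Str.len q) words).map
          (fun w => w.toList.reverse) = [] ) = False from eq_false (by
            simpa using hg), if_false, PySem.Dict.getD_empty]
      rw [walk_main, walkB_main,
        event_eq (grpS (PySem.Str.len q) words) (fun w => w.toList.reverse)
          (fun w => by simp) q.toList.length hLg q.toList.reverse (by simp)]
    · simp only [hsw, show decide (c0 = '?') = false from decide_eq_false hc,
        Bool.false_eq_true, if_false, if_neg hc, dict_fold1, grpOf_eq_map_grpS]
      rw [if_neg (by simpa using hg), PySem.Dict.getD_empty]
      dsimp only
      rw [walk_main, walkB_main,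
        event_eq (grpS (PySem.Str.len q) words) (fun w => w.toList)
          (fun w => rfl) q.toList.length hLg q.toList rfl]

-- ===== VERDICT (by name: the statement is the Claim_ definition above) =====
theorem solution_spec : Claim_equal_solution := by
  intro words queries _ hpre
  unfold Spec_solution
  rw [solution_eq, solution_alt_eq]
  have key : ∀ (qs : List String) (ans : List Int), (∀ r ∈ qs, r ≠ "") →
      qs.foldl (stepA (words.foldl buildStep (PySem.Dict.empty, PySem.Dict.empty))) ans
        = qs.foldl (stepB (words.foldl bStep PySem.Dict.empty)) ans := by
    intro qs
    induction qs with
    | nil => intro ans _; rfl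
    | cons r qs ih =>
        intro ans h
        rw [List.foldl_cons, List.foldl_cons, step_eq words r (h r (by simp)) ans]
        exact ih _ (fun r' hr' => h r' (by simp [hr']))
  exact key queries [] (fun r hr h0 => hpre (h0 ▸ hr))
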